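-- pv_equiv track=rewrite | github.com/PrakharKopergaonkar/DSA_IMP | Previous Year CodeVita/Digital_Time.py | generate_maxTime
-- ===== SOURCE A (Python) =====
-- def generate_maxTime(arr_list,time,point):
--     upper_limit = 0
--     if(point==6):
--         return True
--     if(point==0):
--         upper_limit = 2
--     elif(point==1 and time[point-1]<2):
--         upper_limit = 9
--     elif(point == 1 and time[point-1]==2):
--         upper_limit = 4
--
--     elif(point>1 and time[1]==4 and time[0]==2):
--         upper_limit = 0
--     elif(point==2 or point==4):
--         upper_limit = 5
--     elif((point==3 or point==5)):
--         upper_limit=9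
--
--
--     for i in range(upper_limit,-1,-1):
--         if(arr_list[i]>0):
--             time[point] = i
--             arr_list[i]-=1
--             if(generate_maxTime(arr_list,time,point+1)):
--                 return True
--             time[point] = 0
--             arr_list[i]+=1
--     return False
-- ===== SOURCE B (Python) =====
-- # Iterative backtracking with an explicit stack of placed digits: one loop
-- # advances while a digit fits and pops to resume the previous position
-- # otherwise. Fills time[point:6] in place, restoring arr_list/time on failure.
--
-- def _upper_limit(time, point):
--     # largest digit allowed at a clock position, given the digits placed so far
--     if point == 0:
--         return 2
--     if point == 1 and time[0] < 2:
--         return 9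
--     if point == 1 and time[0] == 2:
--         return 4
--     if point > 1 and time[1] == 4 and time[0] == 2:
--         return 0
--     if point == 2 or point == 4:
--         return 5
--     if point == 3 or point == 5:
--         return 9
--     return 0
--
-- def generate_maxTime(arr_list, time, point):
--     pos = point
--     placed = []          # digits currently placed at positions point .. pos-1
--     cand = None          # next digit to try at pos (None: start from the limit)
--     while True:
--         if pos == 6:
--             return True
--         if cand is None:
--             cand = _upper_limit(time, pos)
--         while cand >= 0 and arr_list[cand] <= 0:
--             cand -= 1
--         if cand >= 0:
--             time[pos] = cand
--             arr_list[cand] -= 1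
--             placed.append(cand)
--             pos += 1
--             cand = None
--         else:
--             if not placed:
--                 return False
--             pos -= 1
--             d = placed.pop()
--             time[pos] = 0
--             arr_list[d] += 1
--             cand = d - 1
-- ===== Notes on version B (the rewrite author's own statement) =====
-- stated objective: alternative
-- what changed: Replaces the recursive backtracking by a single iterative loop with an explicit stack of placed digits (advance while a digit fits, pop and resume the previous position from the next-lower digit otherwise), with the upper-limit chain factored into a helper; mutation of time/arr_list and the descending try order are identical.
import Mathlib
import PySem

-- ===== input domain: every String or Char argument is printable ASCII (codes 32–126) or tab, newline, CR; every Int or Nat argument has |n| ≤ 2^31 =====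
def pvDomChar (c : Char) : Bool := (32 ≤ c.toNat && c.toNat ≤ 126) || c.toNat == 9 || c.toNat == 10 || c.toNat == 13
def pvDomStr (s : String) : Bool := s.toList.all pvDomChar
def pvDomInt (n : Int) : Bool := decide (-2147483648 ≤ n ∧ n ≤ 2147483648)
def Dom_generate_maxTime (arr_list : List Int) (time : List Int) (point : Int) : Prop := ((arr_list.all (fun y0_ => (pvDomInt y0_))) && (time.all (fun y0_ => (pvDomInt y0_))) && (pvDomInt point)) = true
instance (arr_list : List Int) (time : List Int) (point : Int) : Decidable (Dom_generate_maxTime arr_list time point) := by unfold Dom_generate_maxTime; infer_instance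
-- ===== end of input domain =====

-- B replaces A's recursive backtracking by an iterative loop with an explicit stack of
-- placed digits (objective: alternative, iterative vs recursive decomposition). Both
-- mutate time/arr_list the same way in Python; the theorems are about the return value.

-- ===== PORT A =====
-- A's upper_limit elif chain, transcribed branch for branch.
def pvUL (time : List Int) (point : Int) : Int :=
  if point = 0 then 2
  else if point = 1 ∧ PySem.List.pyGetD time (point - 1) 0 < 2 then 9
  else if point = 1 ∧ PySem.List.pyGetD time (point - 1) 0 = 2 then 4
  else if point > 1 ∧ PySem.List.pyGetD time 1 0 = 4 ∧ PySem.List.pyGetD time 0 0 = 2 then 0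
  else if point = 2 ∨ point = 4 then 5
  else if point = 3 ∨ point = 5 then 9
  else 0

-- The recursion threads (arr_list, time) as state; fuel = remaining recursion depth
-- (exact under Pre_, where 0 ≤ point ≤ 6). pyGetD/pySetD are exact under Pre_ (all
-- touched indices are in range there).
mutual
def pvGoA (fuel : Nat) (arr time : List Int) (point : Int) : Bool × List Int × List Int :=
  if point = 6 then (true, arr, time)
  else pvLoopA fuel arr time point (PySem.List.pyRange (pvUL time point) (-1) (-1))
  termination_by (fuel, (PySem.List.pyRange (pvUL time point) (-1) (-1)).length + 2)

def pvLoopA (fuel : Nat) (arr time : List Int) (point : Int) (digits : List Int) : Bool × List Int × List Int :=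
  match digits with
  | [] => (false, arr, time)
  | i :: rest =>
    if 0 < PySem.List.pyGetD arr i 0 then
      let time1 := PySem.List.pySetD time point i
      let arr1 := PySem.List.pySetD arr i (PySem.List.pyGetD arr i 0 - 1)
      match fuel with
      | 0 => (false, arr1, time1)
      | fuel' + 1 =>
        match pvGoA fuel' arr1 time1 (point + 1) with
        | (true, arr2, time2) => (true, arr2, time2)
        | (false, arr2, time2) =>
          pvLoopA (fuel' + 1) (PySem.List.pySetD arr2 i (PySem.List.pyGetD arr2 i 0 + 1))
            (PySem.List.pySetD time2 point 0) point rest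
    else pvLoopA fuel arr time point rest
  termination_by (fuel, digits.length + 1)
end

def generate_maxTime (arr_list : List Int) (time : List Int) (point : Int) : Bool :=
  (pvGoA (6 - point).toNat arr_list time point).1

-- ===== PORT B =====
-- B's _upper_limit helper (early-return chain, reading time[0]/time[1]).
def pvULB (time : List Int) (point : Int) : Int :=
  if point = 0 then 2
  else if point = 1 ∧ PySem.List.pyGetD time 0 0 < 2 then 9
  else if point = 1 ∧ PySem.List.pyGetD time 0 0 = 2 then 4
  else if point > 1 ∧ PySem.List.pyGetD time 1 0 = 4 ∧ PySem.List.pyGetD time 0 0 = 2 then 0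
  else if point = 2 ∨ point = 4 then 5
  else if point = 3 ∨ point = 5 then 9
  else 0

-- Source B's inner 'while cand >= 0 and arr_list[cand] <= 0: cand -= 1'
def pvFindB (arr : List Int) (c : Int) : Int :=
  if h : 0 ≤ c ∧ PySem.List.pyGetD arr c 0 ≤ 0 then pvFindB arr (c - 1) else c
  termination_by (c + 1).toNat
  decreasing_by omega

-- 'if cand is None: cand = _upper_limit(time, pos)'
def pvCand (time : List Int) (pos : Int) (cand : Option Int) : Int :=
  match cand with
  | none => pvULB time pos
  | some c0 => c0

-- Source B's main loop, one constructor per iteration; fuel is a port artifact (none =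
-- fuel exhausted; the fuel passed below is proved sufficient on Pre_).
def pvMachB (f : Nat) (arr time : List Int) (pos : Int) (placed : List Int) (cand : Option Int) :
    Option (Bool × List Int × List Int) :=
  match f with
  | 0 => none
  | f' + 1 =>
    if pos = 6 then some (true, arr, time)
    else
      let c := pvFindB arr (pvCand time pos cand)
      if 0 ≤ c then
        pvMachB f' (PySem.List.pySetD arr c (PySem.List.pyGetD arr c 0 - 1))
          (PySem.List.pySetD time pos c) (pos + 1) (c :: placed) none
      else
        match placed with
        | [] => some (false, arr, time)
        | d :: rest =>
          pvMachB f' (PySem.List.pySetD arr d (PySem.List.pyGetD arr d 0 + 1))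
            (PySem.List.pySetD time (pos - 1) 0) (pos - 1) rest (some (d - 1))

def pvFuelB (arr_list : List Int) : Nat := 23 ^ 7 + 2 * (PySem.List.pyGetD arr_list 0 0).toNat + 64

def generate_maxTime_alt (arr_list : List Int) (time : List Int) (point : Int) : Bool :=
  match pvMachB (pvFuelB arr_list) arr_list time point [] none with
  | some r => r.1
  | none => false

-- ===== PRECONDITION & SPEC =====
-- Pre_ is the natural domain (10 digit counts, 6 clock slots, position 0..6; point = 6
-- returns immediately for any lists), plus the two out-of-range-point classes on which A
-- returns False (nothing placeable, or only zeros consumed inside the lists' bounds). It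
-- excludes the remaining inputs, on which A raises IndexError.
def Pre_generate_maxTime (arr_list : List Int) (time : List Int) (point : Int) : Prop :=
  point = 6 ∨ (0 ≤ point ∧ point ≤ 6 ∧ 10 ≤ arr_list.length ∧ 6 ≤ time.length) ∨
    (point < 0 ∧ 1 ≤ arr_list.length ∧
      (arr_list.getD 0 0 ≤ 0 ∨ (arr_list.getD 0 0 < -point ∧ -point ≤ time.length))) ∨
    (6 < point ∧ 1 ≤ arr_list.length ∧ 2 ≤ time.length ∧
      (arr_list.getD 0 0 ≤ 0 ∨ point + arr_list.getD 0 0 ≤ time.length))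
instance (arr_list : List Int) (time : List Int) (point : Int) : Decidable (Pre_generate_maxTime arr_list time point) := by unfold Pre_generate_maxTime; infer_instance

def pvWitness_generate_maxTime : List Int × List Int × Int :=
  ([2, 1, 1, 0, 1, 1, 0, 0, 0, 1], [0, 0, 0, 0, 0, 0], 0)

def Spec_generate_maxTime (arr_list : List Int) (time : List Int) (point : Int) (out : Bool) : Prop := out = generate_maxTime_alt arr_list time point
instance (arr_list : List Int) (time : List Int) (point : Int) (out : Bool) : Decidable (Spec_generate_maxTime arr_list time point out) := by unfold Spec_generate_maxTime; infer_instance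

-- ===== CLAIM (what is proved, stated in full; the proofs are below) =====
def Claim_equal_generate_maxTime : Prop := ∀ (arr_list : List Int) (time : List Int) (point : Int), Dom_generate_maxTime arr_list time point → Pre_generate_maxTime arr_list time point → Spec_generate_maxTime arr_list time point (generate_maxTime arr_list time point)

-- ===== LEMMAS AND PROOFS =====

-- A-side view of a machine state: the pending loop at the current position, then the
-- unwinding of the stack of placed digits through A's remaining loop levels.
def pvUnw : List Int → List Int → List Int → Int → Bool
  | [], _, _, _ => false
  | d :: rest, arr, time, pos =>
    match pvLoopA (6 - (pos - 1)).toNat (PySem.List.pySetD arr d (PySem.List.pyGetD arr d 0 + 1))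
        (PySem.List.pySetD time (pos - 1) 0) (pos - 1) (PySem.List.pyRange (d - 1) (-1) (-1)) with
    | (true, _, _) => true
    | (false, a2, t2) => pvUnw rest a2 t2 (pos - 1)

def pvHead (arr time : List Int) (pos : Int) (cand : Option Int) : Bool × List Int × List Int :=
  match cand with
  | none => pvGoA (6 - pos).toNat arr time pos
  | some c => pvLoopA (6 - pos).toNat arr time pos (PySem.List.pyRange c (-1) (-1))

def pvInterp (arr time : List Int) (pos : Int) (placed : List Int) (cand : Option Int) : Bool :=
  match pvHead arr time pos cand with
  | (true, _, _) => true
  | (false, a, t) => pvUnw placed a t pos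

-- measure for fuel sufficiency (base-23 positional encoding of the search front)
def pvW (pos : Int) : Nat := 23 ^ (6 - pos).toNat
def pvMP : List Int → Int → Nat
  | [], _ => 0
  | d :: rest, pos => (2 * d + 1).toNat * pvW (pos - 1) + pvMP rest (pos - 1)
def pvM (pos : Int) (placed : List Int) (cand : Option Int) : Nat :=
  (match cand with | none => 22 | some c => (2 * c + 2).toNat) * pvW pos + pvMP placed pos

theorem pv_getD_pos_lt (l : List Int) (n : Nat) (h : 0 < l.getD n 0) : n < l.length := by
  by_contra hn
  rw [List.getD_eq_default _ _ (by omega)] at h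
  omega

theorem pvULB_eq_pvUL (time : List Int) (point : Int) : pvULB time point = pvUL time point := by
  unfold pvULB pvUL
  by_cases h1 : point = 1
  · subst h1
    norm_num
  · rw [if_neg (show ¬(point = 1 ∧ PySem.List.pyGetD time 0 0 < 2) from fun hh => h1 hh.1),
      if_neg (show ¬(point = 1 ∧ PySem.List.pyGetD time 0 0 = 2) from fun hh => h1 hh.1),
      if_neg (show ¬(point = 1 ∧ PySem.List.pyGetD time (point - 1) 0 < 2) from fun hh => h1 hh.1),
      if_neg (show ¬(point = 1 ∧ PySem.List.pyGetD time (point - 1) 0 = 2) from fun hh => h1 hh.1)]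

theorem pvUL_bounds (time : List Int) (point : Int) : 0 ≤ pvUL time point ∧ pvUL time point ≤ 9 := by
  unfold pvUL
  split_ifs <;> omega

theorem pvUL_offrange (time : List Int) (point : Int) (hout : point < 0 ∨ 6 < point) :
    pvUL time point = 0 := by
  unfold pvUL
  rw [if_neg (by omega : ¬ point = 0), if_neg (fun h => (by omega : ¬ point = 1) h.1),
    if_neg (fun h => (by omega : ¬ point = 1) h.1)]
  by_cases h24 : point > 1 ∧ PySem.List.pyGetD time 1 0 = 4 ∧ PySem.List.pyGetD time 0 0 = 2
  · rw [if_pos h24]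
  · rw [if_neg h24, if_neg (by omega : ¬ (point = 2 ∨ point = 4)),
      if_neg (by omega : ¬ (point = 3 ∨ point = 5))]

theorem pv_pos_fuel0 (arr time : List Int) (point : Int) (h : 6 < point) :
    (pvGoA 0 arr time point).1 = false := by
  rw [pvGoA, if_neg (by omega : ¬ point = 6), pvUL_offrange time point (Or.inr h),
    show PySem.List.pyRange (0 : Int) (-1) (-1) = [0] from by decide]
  by_cases hg : 0 < PySem.List.pyGetD arr 0 0
  · simp only [pvLoopA]
    rw [if_pos hg]
  · simp only [pvLoopA]
    rw [if_neg hg]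

theorem pv_neg_false (fuel : Nat) : ∀ (arr time : List Int) (point : Int), point < 0 →
    arr.getD 0 0 < -point → (pvGoA fuel arr time point).1 = false := by
  induction fuel with
  | zero =>
    intro arr time point hpt ha
    rw [pvGoA, if_neg (by omega : ¬ point = 6), pvUL_offrange time point (Or.inl hpt),
      show PySem.List.pyRange (0 : Int) (-1) (-1) = [0] from by decide]
    by_cases hg : 0 < PySem.List.pyGetD arr 0 0
    · simp only [pvLoopA]
      rw [if_pos hg]
    · simp only [pvLoopA]
      rw [if_neg hg]
  | succ fuel' ih =>
    intro arr time point hpt ha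
    rw [pvGoA, if_neg (by omega : ¬ point = 6), pvUL_offrange time point (Or.inl hpt),
      show PySem.List.pyRange (0 : Int) (-1) (-1) = [0] from by decide]
    by_cases hg : 0 < PySem.List.pyGetD arr 0 0
    · have hg' : 0 < arr.getD 0 0 := by rwa [PySem.List.pyGetD_zero] at hg
      have harr1 : (PySem.List.pySetD arr 0 (PySem.List.pyGetD arr 0 0 - 1)).getD 0 0 =
          arr.getD 0 0 - 1 := by
        rw [PySem.List.pyGetD_zero, show (0 : Int) = ((0 : Nat) : Int) from by norm_num,
          PySem.List.pySetD_natCast]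
        simp [List.getD_eq_getElem?_getD, pv_getD_pos_lt arr 0 hg']
      simp only [pvLoopA]
      rw [if_pos hg]
      rcases hG : pvGoA fuel' (PySem.List.pySetD arr 0 (PySem.List.pyGetD arr 0 0 - 1))
          (PySem.List.pySetD time point 0) (point + 1) with ⟨b, a2, t2⟩
      have hb : b = false := by
        have hx := ih (PySem.List.pySetD arr 0 (PySem.List.pyGetD arr 0 0 - 1))
          (PySem.List.pySetD time point 0) (point + 1) (by omega) (by rw [harr1]; omega)
        rw [hG] at hx
        exact hx
      subst hb
      rfl
    · simp only [pvLoopA]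
      rw [if_neg hg]

-- pvFindB basics
theorem pvFindB_le (arr : List Int) (c : Int) : pvFindB arr c ≤ c := by
  induction c using pvFindB.induct arr with
  | case1 c h ih =>
    rw [pvFindB, dif_pos h]
    omega
  | case2 c h =>
    rw [pvFindB, dif_neg h]

theorem pvFindB_pos (arr : List Int) (c : Int) (h : 0 ≤ pvFindB arr c) :
    0 < PySem.List.pyGetD arr (pvFindB arr c) 0 := by
  induction c using pvFindB.induct arr with
  | case1 c hc ih =>
    rw [pvFindB, dif_pos hc] at h ⊢
    exact ih h
  | case2 c hc =>
    rw [pvFindB, dif_neg hc] at h ⊢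
    omega

theorem pvFindB_stop (arr : List Int) (c : Int) (h : ¬ (0 ≤ c ∧ PySem.List.pyGetD arr c 0 ≤ 0)) :
    pvFindB arr c = c := by
  rw [pvFindB, dif_neg h]

-- A's loop skips exactly the digits pvFindB skips
theorem pv_skip (F : Nat) (arr time : List Int) (pos : Int) (c0 : Int) :
    pvLoopA F arr time pos (PySem.List.pyRange c0 (-1) (-1)) =
      pvLoopA F arr time pos (PySem.List.pyRange (pvFindB arr c0) (-1) (-1)) := by
  induction c0 using pvFindB.induct arr with
  | case1 c h ih =>
    rw [pvFindB, dif_pos h]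
    rw [PySem.List.pyRange_neg_one_cons (by omega : (-1 : Int) < c)]
    conv_lhs => rw [pvLoopA]
    rw [if_neg (by omega : ¬ 0 < PySem.List.pyGetD arr c 0)]
    exact ih
  | case2 c h =>
    rw [pvFindB, dif_neg h]

-- measure facts
theorem pvW_pos (pos : Int) : 0 < pvW pos := Nat.pow_pos (by omega)

theorem pvW_succ (pos : Int) (h0 : 0 ≤ pos) (h5 : pos ≤ 5) : pvW pos = 23 * pvW (pos + 1) := by
  unfold pvW
  rw [show (6 - pos).toNat = (6 - (pos + 1)).toNat + 1 by omega, pow_succ]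
  ring

theorem pvM_adv (pos c : Int) (placed : List Int) (cand : Option Int)
    (h0 : 0 ≤ pos) (h5 : pos ≤ 5) (hc0 : 0 ≤ c)
    (hcv : (2 * c + 2).toNat ≤ (match cand with | none => 22 | some c0 => (2 * c0 + 2).toNat)) :
    pvM (pos + 1) (c :: placed) none < pvM pos placed cand := by
  unfold pvM
  have hmp : pvMP (c :: placed) (pos + 1) = (2 * c + 1).toNat * pvW pos + pvMP placed pos := by
    show (2 * c + 1).toNat * pvW (pos + 1 - 1) + pvMP placed (pos + 1 - 1) = _
    norm_num
  rw [hmp, pvW_succ pos h0 h5]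
  have hw : 0 < pvW (pos + 1) := pvW_pos _
  set V := (match cand with | none => 22 | some c0 => (2 * c0 + 2).toNat) with hV
  have h1 : (2 * c + 1).toNat + 1 = (2 * c + 2).toNat := by omega
  nlinarith [pvW_pos (pos + 1)]

theorem pvM_pop (pos d : Int) (rest : List Int) (cand : Option Int) (hd : 0 ≤ d) :
    pvM (pos - 1) rest (some (d - 1)) < pvM pos (d :: rest) cand := by
  unfold pvM
  have hmp : pvMP (d :: rest) pos = (2 * d + 1).toNat * pvW (pos - 1) + pvMP rest (pos - 1) := rfl
  rw [hmp]
  have h1 : (2 * (d - 1) + 2).toNat < (2 * d + 1).toNat := by omega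
  have hw := pvW_pos (pos - 1)
  have := Nat.mul_lt_mul_of_lt_of_le h1 (le_refl (pvW (pos - 1))) hw
  nlinarith [Nat.zero_le ((match cand with | none => 22 | some c => (2 * c + 2).toNat) * pvW pos)]

-- unfolding and small helpers
theorem pvCand_some (time : List Int) (pos c : Int) : pvCand time pos (some c) = c := rfl

theorem pvMachB_succ (f : Nat) (arr time : List Int) (pos : Int) (placed : List Int) (cand : Option Int) :
    pvMachB (f + 1) arr time pos placed cand =
      if pos = 6 then some (true, arr, time)
      else if 0 ≤ pvFindB arr (pvCand time pos cand) then
        pvMachB f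
          (PySem.List.pySetD arr (pvFindB arr (pvCand time pos cand))
            (PySem.List.pyGetD arr (pvFindB arr (pvCand time pos cand)) 0 - 1))
          (PySem.List.pySetD time pos (pvFindB arr (pvCand time pos cand))) (pos + 1)
          (pvFindB arr (pvCand time pos cand) :: placed) none
      else
        match placed with
        | [] => some (false, arr, time)
        | d :: rest =>
          pvMachB f (PySem.List.pySetD arr d (PySem.List.pyGetD arr d 0 + 1))
            (PySem.List.pySetD time (pos - 1) 0) (pos - 1) rest (some (d - 1)) := rfl

theorem pvHead_none (arr time : List Int) (pos : Int) :
    pvHead arr time pos none = pvGoA (6 - pos).toNat arr time pos := rfl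

theorem pvHead_some (arr time : List Int) (pos : Int) (c : Int) :
    pvHead arr time pos (some c) =
      pvLoopA (6 - pos).toNat arr time pos (PySem.List.pyRange c (-1) (-1)) := rfl

-- MAIN: with sufficient fuel the machine returns, and its Bool is the A-side view
theorem pv_mainB : ∀ (f : Nat) (arr time : List Int) (pos : Int) (placed : List Int) (cand : Option Int),
    0 ≤ pos → pos ≤ 6 → (placed.length : Int) ≤ pos →
    (∀ d ∈ placed, 0 ≤ d ∧ d ≤ 9) →
    (∀ c0, cand = some c0 → c0 ≤ 9 ∧ pos ≤ 5) →
    pvM pos placed cand < f →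
    ∃ a t, pvMachB f arr time pos placed cand = some (pvInterp arr time pos placed cand, a, t) := by
  intro f
  induction f with
  | zero => intro _ _ _ _ _ _ _ _ _ _ hM; omega
  | succ f ih =>
    intro arr time pos placed cand hp0 hp6 hlen hpl hcand hM
    by_cases h6 : pos = 6
    · subst h6
      rcases cand with _ | c0
      · have hI : pvInterp arr time 6 placed none = true := by
          unfold pvInterp
          rw [pvHead_none, show ((6 : Int) - 6).toNat = 0 by norm_num, pvGoA, if_pos rfl]
        refine ⟨arr, time, ?_⟩
        rw [pvMachB_succ, if_pos rfl, hI]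
      · exact absurd ((hcand c0 rfl).2) (by omega)
    · have hp5 : pos ≤ 5 := by omega
      have hc09 : pvCand time pos cand ≤ 9 := by
        rcases cand with _ | cc
        · show pvULB time pos ≤ 9
          rw [pvULB_eq_pvUL]
          exact (pvUL_bounds time pos).2
        · exact (hcand cc rfl).1
      set c : Int := pvFindB arr (pvCand time pos cand) with hcdef
      have hcle : c ≤ pvCand time pos cand := pvFindB_le arr _
      have hInterp : pvInterp arr time pos placed cand =
          (match pvLoopA (6 - pos).toNat arr time pos (PySem.List.pyRange c (-1) (-1)) with
           | (true, _, _) => true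
           | (false, a, t) => pvUnw placed a t pos) := by
        unfold pvInterp
        have hH : pvHead arr time pos cand =
            pvLoopA (6 - pos).toNat arr time pos (PySem.List.pyRange c (-1) (-1)) := by
          rcases cand with _ | cc
          · rw [pvHead_none, pvGoA, if_neg h6, ← pvULB_eq_pvUL]
            exact pv_skip _ arr time pos _
          · rw [pvHead_some]
            exact pv_skip _ arr time pos _
        rw [hH]
      by_cases hcpos : 0 ≤ c
      · -- advance
        have hF : (6 - pos).toNat = (6 - (pos + 1)).toNat + 1 := by omega
        have havail : 0 < PySem.List.pyGetD arr c 0 := pvFindB_pos arr _ hcpos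
        have hMadv : pvM (pos + 1) (c :: placed) none < f := by
          have h1 : pvM (pos + 1) (c :: placed) none < pvM pos placed cand := by
            apply pvM_adv pos c placed cand hp0 hp5 hcpos
            rcases cand with _ | cc
            · show (2 * c + 2).toNat ≤ 22
              omega
            · show (2 * c + 2).toNat ≤ (2 * cc + 2).toNat
              have hcc : c ≤ cc := by rwa [pvCand_some] at hcle
              omega
          omega
        obtain ⟨a, t, hrec⟩ := ih (PySem.List.pySetD arr c (PySem.List.pyGetD arr c 0 - 1))
          (PySem.List.pySetD time pos c) (pos + 1) (c :: placed) none
          (by omega) (by omega) (by simp; omega)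
          (by intro d hd
              rcases List.mem_cons.mp hd with rfl | hd'
              · exact ⟨hcpos, by omega⟩
              · exact hpl d hd')
          (by intro c1 h; cases h) hMadv
        have hnext : pvInterp (PySem.List.pySetD arr c (PySem.List.pyGetD arr c 0 - 1))
            (PySem.List.pySetD time pos c) (pos + 1) (c :: placed) none =
            pvInterp arr time pos placed cand := by
          rcases hG : pvGoA (6 - (pos + 1)).toNat
              (PySem.List.pySetD arr c (PySem.List.pyGetD arr c 0 - 1))
              (PySem.List.pySetD time pos c) (pos + 1) with ⟨b, a2, t2⟩
          cases b
          · have hL : pvLoopA (6 - pos).toNat arr time pos (c :: PySem.List.pyRange (c - 1) (-1) (-1)) =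
                pvLoopA (6 - pos).toNat (PySem.List.pySetD a2 c (PySem.List.pyGetD a2 c 0 + 1))
                  (PySem.List.pySetD t2 pos 0) pos (PySem.List.pyRange (c - 1) (-1) (-1)) := by
              conv_lhs => rw [hF]
              simp only [pvLoopA]
              rw [if_pos havail, ← hF, hG]
            rw [hInterp, PySem.List.pyRange_neg_one_cons (by omega : (-1 : Int) < c), hL]
            unfold pvInterp
            rw [pvHead_none, hG]
            show pvUnw (c :: placed) a2 t2 (pos + 1) = _
            conv_lhs => rw [pvUnw]
            rw [show pos + 1 - 1 = pos by ring]
          · have hL : pvLoopA (6 - pos).toNat arr time pos (c :: PySem.List.pyRange (c - 1) (-1) (-1)) =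
                (true, a2, t2) := by
              conv_lhs => rw [hF]
              simp only [pvLoopA]
              rw [if_pos havail, ← hF, hG]
            rw [hInterp, PySem.List.pyRange_neg_one_cons (by omega : (-1 : Int) < c), hL]
            unfold pvInterp
            rw [pvHead_none, hG]
        refine ⟨a, t, ?_⟩
        rw [pvMachB_succ, if_neg h6, ← hcdef, if_pos hcpos, hrec, hnext]
      · -- c < 0: pop or fail
        have hnil : PySem.List.pyRange c (-1) (-1) = [] :=
          PySem.List.pyRange_neg_one_eq_nil (by omega)
        have hIfalse : pvInterp arr time pos placed cand = pvUnw placed arr time pos := by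
          rw [hInterp, hnil,
            show pvLoopA (6 - pos).toNat arr time pos [] = (false, arr, time) from by
              simp [pvLoopA]]
        rcases placed with _ | ⟨d, rest⟩
        · refine ⟨arr, time, ?_⟩
          rw [pvMachB_succ, if_neg h6, ← hcdef, if_neg hcpos, hIfalse]
          rfl
        · have hd0 : 0 ≤ d := (hpl d (by simp)).1
          have hMpop : pvM (pos - 1) rest (some (d - 1)) < f := by
            have := pvM_pop pos d rest cand hd0
            omega
          obtain ⟨a, t, hrec⟩ := ih (PySem.List.pySetD arr d (PySem.List.pyGetD arr d 0 + 1))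
            (PySem.List.pySetD time (pos - 1) 0) (pos - 1) rest (some (d - 1))
            (by simp at hlen; omega) (by omega) (by simp at hlen ⊢; omega)
            (fun d' hd' => hpl d' (by simp [hd']))
            (by rintro c1 ⟨rfl⟩
                have := (hpl d (by simp)).2
                constructor <;> omega)
            hMpop
          have hpop : pvInterp (PySem.List.pySetD arr d (PySem.List.pyGetD arr d 0 + 1))
              (PySem.List.pySetD time (pos - 1) 0) (pos - 1) rest (some (d - 1)) =
              pvUnw (d :: rest) arr time pos := by
            unfold pvInterp
            rw [pvHead_some]
            conv_rhs => rw [pvUnw]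
          refine ⟨a, t, ?_⟩
          rw [pvMachB_succ, if_neg h6, ← hcdef, if_neg hcpos]
          show pvMachB f (PySem.List.pySetD arr d (PySem.List.pyGetD arr d 0 + 1))
            (PySem.List.pySetD time (pos - 1) 0) (pos - 1) rest (some (d - 1)) = _
          rw [hrec, hpop, hIfalse]

-- off-range: unwinding a stack of nonpositive digits always fails
theorem pv_unwB : ∀ (placed : List Int) (f : Nat) (arr time : List Int) (pos c : Int),
    c < 0 → (∀ d ∈ placed, d ≤ 0) → (∀ j : Nat, j ≤ placed.length → pos - j ≠ 6) →
    placed.length < f →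
    ∃ a t, pvMachB f arr time pos placed (some c) = some (false, a, t) := by
  intro placed
  induction placed with
  | nil =>
    intro f arr time pos c hc _ hpos hf
    obtain ⟨f', rfl⟩ : ∃ f', f = f' + 1 := ⟨f - 1, by omega⟩
    refine ⟨arr, time, ?_⟩
    rw [pvMachB_succ, if_neg (by simpa using hpos 0 (by simp)), pvCand_some,
      pvFindB_stop arr c (by omega), if_neg (by omega)]
  | cons d rest ihr =>
    intro f arr time pos c hc hd hpos hf
    obtain ⟨f', rfl⟩ : ∃ f', f = f' + 1 := ⟨f - 1, by omega⟩
    rw [pvMachB_succ, if_neg (by simpa using hpos 0 (by simp)), pvCand_some,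
      pvFindB_stop arr c (by omega), if_neg (by omega)]
    exact ihr f' _ _ (pos - 1) (d - 1) (by have := hd d (by simp); omega)
      (fun d' hd' => hd d' (by simp [hd']))
      (by intro j hj
          have := hpos (j + 1) (by simp; omega)
          push_cast at this ⊢
          omega)
      (by simp at hf ⊢; omega)

-- off-range: the machine only consumes zeros, then fails
theorem pv_fwdB : ∀ (n : Nat) (f : Nat) (arr time : List Int) (pos : Int) (placed : List Int),
    PySem.List.pyGetD arr 0 0 = (n : Int) →
    (∀ j : Nat, j ≤ n → (pos + j < 0 ∨ 6 < pos + j)) →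
    (∀ d ∈ placed, d ≤ 0) →
    (∀ j : Nat, j ≤ placed.length → pos - j ≠ 6) →
    2 * n + placed.length + 2 ≤ f →
    ∃ a t, pvMachB f arr time pos placed none = some (false, a, t) := by
  intro n
  induction n with
  | zero =>
    intro f arr time pos placed ha hout hd hpos hf
    obtain ⟨f', rfl⟩ : ∃ f', f = f' + 1 := ⟨f - 1, by omega⟩
    have h6 : pos ≠ 6 := by
      have := hout 0 (by omega)
      simp at this
      omega
    have hUL : pvCand time pos none = 0 := by
      show pvULB time pos = 0
      rw [pvULB_eq_pvUL]
      exact pvUL_offrange time pos (by simpa using hout 0 (by omega))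
    have hfind : pvFindB arr (pvCand time pos none) = -1 := by
      rw [hUL, pvFindB, dif_pos ⟨le_refl 0, by simp [ha]⟩]
      exact pvFindB_stop arr (-1) (by omega)
    rw [pvMachB_succ, if_neg h6, hfind, if_neg (by omega)]
    rcases placed with _ | ⟨d, rest⟩
    · exact ⟨arr, time, rfl⟩
    · exact pv_unwB rest f' _ _ (pos - 1) (d - 1) (by have := hd d (by simp); omega)
        (fun d' hd' => hd d' (by simp [hd']))
        (by intro j hj
            have := hpos (j + 1) (by simp; omega)
            push_cast at this ⊢
            omega)
        (by simp at hf ⊢; omega)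
  | succ n ihn =>
    intro f arr time pos placed ha hout hd hpos hf
    obtain ⟨f', rfl⟩ : ∃ f', f = f' + 1 := ⟨f - 1, by omega⟩
    have h6 : pos ≠ 6 := by
      have := hout 0 (by omega)
      simp at this
      omega
    have hUL : pvCand time pos none = 0 := by
      show pvULB time pos = 0
      rw [pvULB_eq_pvUL]
      exact pvUL_offrange time pos (by simpa using hout 0 (by omega))
    have hfind : pvFindB arr (pvCand time pos none) = 0 := by
      rw [hUL]
      exact pvFindB_stop arr 0 (by rw [ha]; push_cast; omega)
    rw [pvMachB_succ, if_neg h6, hfind, if_pos (le_refl (0 : Int))]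
    have hlen : 0 < arr.length := by
      apply pv_getD_pos_lt arr 0
      rw [← PySem.List.pyGetD_zero, ha]
      push_cast
      omega
    have ha' : PySem.List.pyGetD (PySem.List.pySetD arr 0 (PySem.List.pyGetD arr 0 0 - 1)) 0 0
        = (n : Int) := by
      rw [show PySem.List.pySetD arr 0 (PySem.List.pyGetD arr 0 0 - 1)
          = arr.set 0 (PySem.List.pyGetD arr 0 0 - 1) from by
        rw [show (0 : Int) = ((0 : Nat) : Int) from rfl, PySem.List.pySetD_natCast]]
      rw [PySem.List.pyGetD_zero, List.getD_eq_getElem?_getD, List.getElem?_set,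
        if_pos rfl, if_pos hlen]
      simp only [Option.getD_some]
      omega
    exact ihn f' _ _ (pos + 1) (0 :: placed) ha'
      (by intro j hj
          have := hout (j + 1) (by omega)
          push_cast at this ⊢
          omega)
      (by intro d' hd'
          rcases List.mem_cons.mp hd' with rfl | hd''
          · omega
          · exact hd d' hd'')
      (by intro j hj
          rcases Nat.eq_zero_or_pos j with rfl | hjpos
          · have := hout 1 (by omega)
            push_cast at this ⊢
            omega
          · have := hpos (j - 1) (by simp at hj; omega)
            push_cast at this ⊢
            omega)
      (by simp at hf ⊢; omega)

theorem pvM_init_lt (arr : List Int) (point : Int) (h0 : 0 ≤ point) :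
    pvM point [] none < pvFuelB arr := by
  have h22 : pvM point [] none = 22 * pvW point := by
    simp [pvM, pvMP]
  rw [h22]
  unfold pvFuelB pvW
  have h2 : (23 : Nat) ^ (6 - point).toNat ≤ 23 ^ 6 := Nat.pow_le_pow_right (by omega) (by omega)
  have h2' : 22 * (23 : Nat) ^ (6 - point).toNat ≤ 22 * 23 ^ 6 := Nat.mul_le_mul_left _ h2
  have h6 : (23 : Nat) ^ 6 = 148035889 := by norm_num
  have h7 : (23 : Nat) ^ 7 = 3404825447 := by norm_num
  omega

-- ===== VERDICT (by name: the statement is the Claim_ definition above) =====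
theorem generate_maxTime_spec : Claim_equal_generate_maxTime := by
  unfold Claim_equal_generate_maxTime
  intro arr time point hdom hpre
  unfold Spec_generate_maxTime generate_maxTime generate_maxTime_alt
  rcases hpre with h6 | ⟨h0, h6', ha, ht⟩ | ⟨hneg, ha, ha0⟩ | ⟨hgt, ha, ht, ha0⟩
  · subst h6
    have hA : (pvGoA ((6 - (6 : Int)).toNat) arr time 6).1 = true := by
      rw [pvGoA]
      norm_num
    have hB : pvMachB (pvFuelB arr) arr time 6 [] none = some (true, arr, time) := by
      obtain ⟨f', hf⟩ : ∃ f', pvFuelB arr = f' + 1 := ⟨pvFuelB arr - 1, by unfold pvFuelB; omega⟩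
      rw [hf, pvMachB_succ, if_pos rfl]
    rw [hA, hB]
  · -- in-range search: machine = A-side view = A
    obtain ⟨a, t, hm⟩ := pv_mainB (pvFuelB arr) arr time point [] none h0 h6'
      (by simpa using h0) (by simp) (by intro c h; cases h) (pvM_init_lt arr point h0)
    rw [hm]
    unfold pvInterp
    rw [pvHead_none]
    rcases hG : pvGoA (6 - point).toNat arr time point with ⟨b, a2, t2⟩
    cases b <;> rfl
  · -- point < 0
    have hA : (pvGoA (6 - point).toNat arr time point).1 = false := by
      apply pv_neg_false _ arr time point hneg
      rcases ha0 with h | ⟨h, -⟩ <;> omega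
    rw [hA]
    by_cases harr : arr.getD 0 0 ≤ 0
    · -- nothing placeable at all
      obtain ⟨f', hf⟩ : ∃ f', pvFuelB arr = f' + 1 := ⟨pvFuelB arr - 1, by unfold pvFuelB; omega⟩
      have hfind : pvFindB arr (pvCand time point none) = -1 := by
        rw [show pvCand time point none = 0 from by
          show pvULB time point = 0
          rw [pvULB_eq_pvUL]; exact pvUL_offrange time point (Or.inl hneg)]
        rw [pvFindB, dif_pos ⟨le_refl 0, by rw [PySem.List.pyGetD_zero]; omega⟩]
        exact pvFindB_stop arr (-1) (by omega)
      rw [hf, pvMachB_succ, if_neg (by omega), hfind, if_neg (by omega)]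
    · -- consumes its zeros below position 0, then fails
      have h' : arr.getD 0 0 < -point := by
        rcases ha0 with h | ⟨h, -⟩ <;> omega
      obtain ⟨a, t, hm⟩ := pv_fwdB (arr.getD 0 0).toNat (pvFuelB arr) arr time point []
        (by rw [PySem.List.pyGetD_zero]; omega)
        (by intro j hj; left; omega)
        (by simp) (by intro j hj; simp at hj; omega)
        (by unfold pvFuelB; rw [PySem.List.pyGetD_zero]; simp; omega)
      rw [hm]
  · -- point > 6
    have hA : (pvGoA (6 - point).toNat arr time point).1 = false := by
      rw [show (6 - point).toNat = 0 from by omega]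
      exact pv_pos_fuel0 arr time point hgt
    rw [hA]
    by_cases harr : arr.getD 0 0 ≤ 0
    · obtain ⟨f', hf⟩ : ∃ f', pvFuelB arr = f' + 1 := ⟨pvFuelB arr - 1, by unfold pvFuelB; omega⟩
      have hfind : pvFindB arr (pvCand time point none) = -1 := by
        rw [show pvCand time point none = 0 from by
          show pvULB time point = 0
          rw [pvULB_eq_pvUL]; exact pvUL_offrange time point (Or.inr hgt)]
        rw [pvFindB, dif_pos ⟨le_refl 0, by rw [PySem.List.pyGetD_zero]; omega⟩]
        exact pvFindB_stop arr (-1) (by omega)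
      rw [hf, pvMachB_succ, if_neg (by omega), hfind, if_neg (by omega)]
    · obtain ⟨a, t, hm⟩ := pv_fwdB (arr.getD 0 0).toNat (pvFuelB arr) arr time point []
        (by rw [PySem.List.pyGetD_zero]; omega)
        (by intro j hj; right; omega)
        (by simp) (by intro j hj; simp at hj; omega)
        (by unfold pvFuelB; rw [PySem.List.pyGetD_zero]; simp; omega)
      rw [hm]
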